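-- pv_equiv track=rewrite | github.com/Lighting-Ari/BooTdotDEV | Python/Loops/T/T1/T3/main.py | longest_uppercase_streak
-- ===== SOURCE A (Python) =====
-- def longest_uppercase_streak(text):
--     current_streak = 0
--     longest_streak = 0
--
--     for char in text:
--         if char >="A" and char <="Z":
--             current_streak += 1
--             if current_streak > longest_streak :
--                 longest_streak = current_streak
--         else :
--             current_streak = 0
--
--     return longest_streak
-- ===== SOURCE B (Python) =====
-- def longest_uppercase_streak(text):
--     lengths = []
--     i, n = 0, len(text)
--     while i < n:
--         if "A" <= text[i] <= "Z":
--             j = i + 1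
--             while j < n and "A" <= text[j] <= "Z":
--                 j += 1
--             lengths.append(j - i)
--             i = j
--         else:
--             i += 1
--     return max(lengths, default=0)
-- ===== Notes on version B (the rewrite author's own statement) =====
-- stated objective: alternative
-- what changed: B scans the string as maximal uppercase runs with a two-pointer skip (collecting each run length and taking the max with default 0) instead of maintaining a per-character running streak counter and best-so-far update.
import Mathlib
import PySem

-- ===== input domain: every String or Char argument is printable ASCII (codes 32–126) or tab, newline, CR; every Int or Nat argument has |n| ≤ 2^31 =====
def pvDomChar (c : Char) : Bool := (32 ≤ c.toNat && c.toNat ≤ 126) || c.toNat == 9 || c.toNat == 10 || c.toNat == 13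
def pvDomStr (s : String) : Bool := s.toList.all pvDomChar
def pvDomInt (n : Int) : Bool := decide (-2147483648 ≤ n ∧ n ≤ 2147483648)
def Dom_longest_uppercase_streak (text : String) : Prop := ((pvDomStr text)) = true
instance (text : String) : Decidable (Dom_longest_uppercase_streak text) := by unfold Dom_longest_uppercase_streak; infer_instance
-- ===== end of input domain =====

-- B replaces A's per-character running streak counter by a two-pointer scan over
-- maximal uppercase runs, taking the max of the collected run lengths (default 0).


-- ===== PORT A =====
-- char >= "A" and char <= "Z"
def pvIsUp (c : Char) : Bool := 'A' ≤ c && c ≤ 'Z'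

-- the for-loop over text, state (current_streak, longest_streak)
def pvAGo : List Char → Int → Int → Int
  | [], _, longest => longest
  | c :: rest, current, longest =>
    if pvIsUp c then
      let current' := current + 1
      if current' > longest then pvAGo rest current' current'
      else pvAGo rest current' longest
    else pvAGo rest 0 longest

def longest_uppercase_streak (text : String) : Int :=
  pvAGo text.toList 0 0

-- ===== PORT B =====
-- the outer while loop: collect the length of each maximal uppercase run
-- (the inner 'while j < n and upper' advance = takeWhile/dropWhile on the rest)
def pvRuns : List Char → List Int
  | [] => []
  | c :: rest =>
    if pvIsUp c then
      (1 + (rest.takeWhile pvIsUp).length : Int) :: pvRuns (rest.dropWhile pvIsUp)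
    else pvRuns rest
termination_by l => l.length
decreasing_by
  · simpa using Nat.lt_succ_of_le (List.length_dropWhile_le pvIsUp rest)
  · simp

-- max(lengths, default=0)
def longest_uppercase_streak_alt (text : String) : Int :=
  (pvRuns text.toList).foldr max 0

-- ===== PRECONDITION & SPEC =====
def Spec_longest_uppercase_streak (text : String) (out : Int) : Prop := out = longest_uppercase_streak_alt text
instance (text : String) (out : Int) : Decidable (Spec_longest_uppercase_streak text out) := by unfold Spec_longest_uppercase_streak; infer_instance

-- ===== CLAIM (what is proved, stated in full; the proofs are below) =====
def Claim_equal_longest_uppercase_streak : Prop := ∀ (text : String), Dom_longest_uppercase_streak text → Spec_longest_uppercase_streak text (longest_uppercase_streak text)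

-- ===== LEMMAS AND PROOFS =====

-- reference "max streak ending carry": first run is credited `cur` extra
def pvM : Int → List Char → Int
  | _, [] => 0
  | cur, c :: rest => if pvIsUp c then max (cur + 1) (pvM (cur + 1) rest) else pvM 0 rest

theorem pvAGo_eq (l : List Char) : ∀ cur long : Int, 0 ≤ cur → cur ≤ long →
    pvAGo l cur long = max long (pvM cur l) := by
  induction l with
  | nil => intro cur long h0 h1; simp [pvAGo, pvM]; omega
  | cons c rest ih =>
    intro cur long h0 h1
    by_cases hc : pvIsUp c = true
    · have h2 : pvAGo (c :: rest) cur long = pvAGo rest (cur + 1) (max long (cur + 1)) := by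
        simp only [pvAGo, hc, if_pos]
        split_ifs with h
        · have : max long (cur + 1) = cur + 1 := by omega
          rw [this]
        · have : max long (cur + 1) = long := by omega
          rw [this]
      rw [h2, ih (cur + 1) (max long (cur + 1)) (by omega) (by omega)]
      simp only [pvM, hc, if_pos]
      omega
    · simp only [pvAGo, pvM, hc, Bool.false_eq_true]
      exact ih 0 long le_rfl (by omega)

theorem pvM_run (c : Char) (hc : pvIsUp c = true) (rest : List Char) : ∀ cur : Int,
    pvM cur (c :: rest) =
      max (cur + 1 + (rest.takeWhile pvIsUp).length) (pvM 0 (rest.dropWhile pvIsUp)) := by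
  induction rest with
  | nil => intro cur; simp [pvM, hc]
  | cons c' rest' ih =>
    intro cur
    by_cases hc' : pvIsUp c' = true
    · have h1 : pvM cur (c :: c' :: rest') = max (cur + 1) (pvM (cur + 1) (c' :: rest')) := by
        simp [pvM, hc]
      have h0 : pvM (cur + 1) (c' :: rest') = pvM (cur + 1) (c :: rest') := by
        simp [pvM, hc, hc']
      rw [h1, h0, ih (cur + 1)]
      simp only [List.takeWhile_cons, List.dropWhile_cons, hc', if_pos, List.length_cons]
      push_cast
      omega
    · have hf : pvIsUp c' = false := by simpa using hc'
      have h1 : pvM cur (c :: c' :: rest') = max (cur + 1) (pvM 0 rest') := by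
        simp [pvM, hc, hf]
      have h2 : pvM 0 (c' :: rest') = pvM 0 rest' := by simp [pvM, hf]
      rw [h1]
      simp only [List.takeWhile_cons, List.dropWhile_cons, hf, Bool.false_eq_true, if_false,
        List.length_nil, h2]
      omega

theorem pvM_eq_runs (l : List Char) : pvM 0 l = (pvRuns l).foldr max 0 := by
  induction l using pvRuns.induct with
  | case1 => simp [pvM, pvRuns]
  | case2 c rest hc ih =>
    rw [pvM_run c hc rest 0, pvRuns, if_pos hc]
    simp only [List.foldr_cons]
    rw [ih]
    omega
  | case3 c rest hc ih =>
    simp only [pvM, hc, Bool.false_eq_true]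
    rw [pvRuns, if_neg hc]
    exact ih

-- ===== VERDICT (by name: the statement is the Claim_ definition above) =====
theorem longest_uppercase_streak_spec : Claim_equal_longest_uppercase_streak := by
  intro text _
  unfold Spec_longest_uppercase_streak longest_uppercase_streak longest_uppercase_streak_alt
  rw [pvAGo_eq text.toList 0 0 le_rfl le_rfl, pvM_eq_runs]
  have : (0:Int) ≤ (pvRuns text.toList).foldr max 0 := by
    induction pvRuns text.toList with
    | nil => simp
    | cons a t ih => simp only [List.foldr_cons]; omega
  omega
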